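-- pv_equiv track=rewrite | github.com/kuopinghsu/jv32.dev | scripts/align_trailing_comments.py | split_trailing_comment
-- ===== SOURCE A (Python) =====
-- from typing import Dict, List, Optional, Tuple
--
-- def split_trailing_comment(line: str) -> Tuple[str, Optional[str]]:
--     in_string = False
--     escaped = False
--
--     for index, char in enumerate(line):
--         if escaped:
--             escaped = False
--             continue
--         if char == "\\":
--             escaped = True
--             continue
--         if char == '"':
--             in_string = not in_string
--             continue
--         if not in_string and line[index:index + 2] == "//":
--             return line[:index].rstrip(), line[index:].rstrip("\n")
--
--     return line.rstrip("\n"), None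
-- ===== SOURCE B (Python) =====
-- from typing import Dict, List, Optional, Tuple
--
-- def split_trailing_comment(line: str) -> Tuple[str, Optional[str]]:
--     # Jump between "//" candidates with str.find; a position is escaped iff the
--     # run of backslashes just before it has odd length, and the string state at a
--     # candidate is the parity of unescaped quotes seen so far.
--     def unescaped(k: int) -> bool:
--         j = k
--         while j > 0 and line[j - 1] == "\\":
--             j -= 1
--         return (k - j) % 2 == 0
--
--     quotes = 0
--     scanned = 0
--     pos = 0
--     while True:
--         i = line.find("//", pos)
--         if i == -1:
--             return line.rstrip("\n"), None
--         for k in range(scanned, i):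
--             if line[k] == '"' and unescaped(k):
--                 quotes += 1
--         scanned = i
--         if quotes % 2 == 0 and unescaped(i):
--             return line[:i].rstrip(), line[i:].rstrip("\n")
--         pos = i + 1
-- ===== Notes on version B (the rewrite author's own statement) =====
-- stated objective: faster
-- what changed: Replaces A's per-character escape/string state machine by C-speed str.find jumps between comment-marker candidates, deciding escapedness at a candidate by backslash-run parity and the in-string state by counting unescaped quotes before it.
import Mathlib
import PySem

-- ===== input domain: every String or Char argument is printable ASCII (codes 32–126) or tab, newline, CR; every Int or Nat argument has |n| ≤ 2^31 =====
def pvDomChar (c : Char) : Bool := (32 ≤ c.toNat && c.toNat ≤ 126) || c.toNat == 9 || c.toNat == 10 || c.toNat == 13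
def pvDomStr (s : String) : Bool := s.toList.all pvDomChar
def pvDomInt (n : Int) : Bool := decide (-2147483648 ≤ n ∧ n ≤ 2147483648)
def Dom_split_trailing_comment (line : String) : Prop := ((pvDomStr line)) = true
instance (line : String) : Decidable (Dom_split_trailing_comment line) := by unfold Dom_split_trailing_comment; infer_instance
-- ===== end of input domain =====

-- B replaces A's per-character state machine by str.find jumps between "//" candidates,
-- deciding escapedness by backslash-run parity and string state by unescaped-quote parity
-- (objective: faster; a timing run measured B faster at large sizes).

-- exact port of str.rstrip("\n"): drop trailing '\n' characters (shared library primitive)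
def pvRstripNl (cs : List Char) : List Char := (cs.reverse.dropWhile (· == '\n')).reverse

-- ===== PORT A =====
def pvALoop (cs : List Char) : List (Int × Char) → Bool → Bool → String × Option String
  | [], _, _ => (String.ofList (pvRstripNl cs), none)
  | (i, c) :: rest, in_string, escaped =>
    if escaped then pvALoop cs rest in_string false
    else if c == '\\' then pvALoop cs rest in_string true
    else if c == '"' then pvALoop cs rest (!in_string) escaped
    else if (!in_string) && (PySem.List.slice cs (some i) (some (i + 2)) == ['/', '/']) then
      (String.ofList (PySem.Chars.rstrip (PySem.List.slice cs none (some i))),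
       some (String.ofList (pvRstripNl (PySem.List.slice cs (some i) none))))
    else pvALoop cs rest in_string escaped

def split_trailing_comment (line : String) : String × Option String :=
  pvALoop line.toList (PySem.List.enumerate line.toList 0) false false

-- ===== PORT B =====
-- while j > 0 and line[j-1] == "\\": j -= 1   (returns the final j)
def pvRunStart (cs : List Char) : Nat → Nat
  | 0 => 0
  | j + 1 => if cs[j]? == some '\\' then pvRunStart cs j else j + 1

def pvUnescaped (cs : List Char) (k : Nat) : Bool := (k - pvRunStart cs k) % 2 == 0

-- for k in range(scanned, i): if line[k] == '"' and unescaped(k): quotes += 1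
def pvCountQuotes (cs : List Char) (scanned i quotes : Nat) : Nat :=
  (PySem.List.pyRange scanned i 1).foldl
    (fun q k => if (PySem.List.pyGet? cs k == some '"') && pvUnescaped cs k.toNat then q + 1 else q)
    quotes

-- the while-True loop; fuel = length+1-pos bounds the number of iterations (i ≥ pos and pos grows)
def pvBLoop (cs : List Char) : Nat → Nat → Nat → Nat → String × Option String
  | 0, _, _, _ => (String.ofList (pvRstripNl cs), none)
  | fuel + 1, pos, scanned, quotes =>
    let i := PySem.Chars.findFrom cs ['/', '/'] (pos : Int) none
    if i == -1 then (String.ofList (pvRstripNl cs), none)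
    else
      let iN := i.toNat
      let quotes' := pvCountQuotes cs scanned iN quotes
      if (quotes' % 2 == 0) && pvUnescaped cs iN then
        (String.ofList (PySem.Chars.rstrip (PySem.List.slice cs none (some (iN : Int)))),
         some (String.ofList (pvRstripNl (PySem.List.slice cs (some (iN : Int)) none))))
      else pvBLoop cs fuel (iN + 1) iN quotes'

def split_trailing_comment_alt (line : String) : String × Option String :=
  pvBLoop line.toList (line.toList.length + 1) 0 0 0

-- ===== PRECONDITION & SPEC =====
def Spec_split_trailing_comment (line : String) (out : String × Option String) : Prop := out = split_trailing_comment_alt line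
instance (line : String) (out : String × Option String) : Decidable (Spec_split_trailing_comment line out) := by unfold Spec_split_trailing_comment; infer_instance

-- ===== CLAIM (what is proved, stated in full; the proofs are below) =====
def Claim_equal_split_trailing_comment : Prop := ∀ (line : String), Dom_split_trailing_comment line → Spec_split_trailing_comment line (split_trailing_comment line)

-- ===== LEMMAS AND PROOFS =====

-- canonical state of A's machine before position j
def pvEsc (cs : List Char) : Nat → Bool
  | 0 => false
  | j + 1 => !pvEsc cs j && cs[j]? == some '\\'

def pvIns (cs : List Char) : Nat → Bool
  | 0 => false
  | j + 1 => if !pvEsc cs j && cs[j]? == some '"' then !pvIns cs j else pvIns cs j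

def pvTwo (cs : List Char) (j : Nat) : Bool := (cs[j]? == some '/') && (cs[j + 1]? == some '/')

def pvAccept (cs : List Char) (j : Nat) : Bool := !pvEsc cs j && !pvIns cs j && pvTwo cs j

def pvFirst (cs : List Char) (j : Nat) : Option Nat :=
  if h : j < cs.length then
    if pvAccept cs j then some j else pvFirst cs (j + 1)
  else none
termination_by cs.length - j
decreasing_by omega

def pvOut (cs : List Char) : Option Nat → String × Option String
  | none => (String.ofList (pvRstripNl cs), none)
  | some i => (String.ofList (PySem.Chars.rstrip (cs.take i)),
               some (String.ofList (pvRstripNl (cs.drop i))))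

lemma pvTwo_iff (cs : List Char) (j : Nat) :
    pvTwo cs j = true ↔ ['/', '/'] <+: cs.drop j := by
  have h0 : cs[j]? = (cs.drop j)[0]? := by simp [List.getElem?_drop]
  have h1 : cs[j + 1]? = (cs.drop j)[1]? := by simp [List.getElem?_drop]
  unfold pvTwo
  rw [h0, h1]
  cases h : cs.drop j with
  | nil => simp
  | cons a t =>
    cases t with
    | nil => simp [List.cons_prefix_cons, List.prefix_nil]
    | cons b t' =>
      simp only [List.cons_prefix_cons, List.nil_prefix, and_true, List.getElem?_cons_zero,
        List.getElem?_cons_succ, Bool.and_eq_true, beq_iff_eq, Option.some.injEq]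
      constructor
      · rintro ⟨rfl, rfl⟩; exact ⟨rfl, rfl⟩
      · rintro ⟨rfl, rfl⟩; exact ⟨rfl, rfl⟩

lemma pvFirst_skip (cs : List Char) (a : Nat) (ha : pvAccept cs a = false) :
    pvFirst cs a = pvFirst cs (a + 1) := by
  conv_lhs => rw [pvFirst]
  split
  · rw [if_neg]
    simp [ha]
  · conv_rhs => rw [pvFirst]
    rw [dif_neg (by omega)]

lemma pvALoop_eq (cs : List Char) (j : Nat) (hj : j ≤ cs.length) :
    pvALoop cs (PySem.List.enumerate (cs.drop j) (j : Int)) (pvIns cs j) (pvEsc cs j) =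
      pvOut cs (pvFirst cs j) := by
  by_cases h : j < cs.length
  · have hdrop : cs.drop j = cs[j] :: cs.drop (j + 1) := List.drop_eq_getElem_cons h
    have hget : cs[j]? = some cs[j] := List.getElem?_eq_getElem h
    have hcast : (j : Int) + 1 = ((j + 1 : Nat) : Int) := by push_cast; ring
    have IH := pvALoop_eq cs (j + 1) (by omega)
    rw [hdrop, PySem.List.enumerate_cons, hcast]
    rw [pvALoop.eq_2]
    by_cases hE : pvEsc cs j
    · have hE1 : pvEsc cs (j + 1) = false := by simp [pvEsc, hE]
      have hI1 : pvIns cs (j + 1) = pvIns cs j := by simp [pvIns, hE]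
      rw [if_pos hE, pvFirst_skip cs j (by simp [pvAccept, hE]), ← hI1, ← hE1]
      exact IH
    · have hEf : pvEsc cs j = false := by simpa using hE
      rw [if_neg (by simp [hEf])]
      by_cases hB : cs[j] = '\\'
      · have hE1 : pvEsc cs (j + 1) = true := by simp [pvEsc, hEf, hget, hB]
        have hI1 : pvIns cs (j + 1) = pvIns cs j := by simp [pvIns, hget, hB]
        have hT : pvTwo cs j = false := by simp [pvTwo, hget, hB]
        rw [if_pos (by simp [hB]), pvFirst_skip cs j (by simp [pvAccept, hT]), ← hI1, ← hE1]
        exact IH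
      · rw [if_neg (by simp [hB])]
        by_cases hQ : cs[j] = '"'
        · have hE1 : pvEsc cs (j + 1) = false := by simp [pvEsc, hget, hQ]
          have hI1 : pvIns cs (j + 1) = !pvIns cs j := by simp [pvIns, hget, hQ, hEf]
          have hT : pvTwo cs j = false := by simp [pvTwo, hget, hQ]
          rw [if_pos (by simp [hQ]), pvFirst_skip cs j (by simp [pvAccept, hT]), ← hI1, hEf, ← hE1]
          exact IH
        · rw [if_neg (by simp [hQ])]
          have hsl : PySem.List.slice cs (some (j : Int)) (some ((j : Int) + 2)) = (cs.drop j).take 2 := by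
            have := PySem.List.slice_natCast_add cs j 2
            simpa using this
          have htake : ((cs.drop j).take 2 == ['/', '/']) = pvTwo cs j := by
            by_cases ht : pvTwo cs j
            · have h2 := (pvTwo_iff cs j).mp ht
              rw [List.prefix_iff_eq_take] at h2
              have h2' : List.take 2 (List.drop j cs) = ['/', '/'] := by simpa using h2.symm
              rw [ht, h2']
              simp
            · have htf : pvTwo cs j = false := by simpa using ht
              rw [htf]
              by_cases he : (cs.drop j).take 2 = ['/', '/']
              · exact absurd ((pvTwo_iff cs j).mpr (by rw [List.prefix_iff_eq_take]; simpa using he.symm)) ht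
              · simpa using he
          rw [hsl, htake]
          by_cases hC : (!pvIns cs j && pvTwo cs j) = true
          · rw [if_pos hC]
            have hacc : pvAccept cs j = true := by
              simp only [pvAccept, hEf]
              simpa using hC
            rw [pvFirst, dif_pos h, if_pos hacc]
            simp [pvOut, PySem.List.slice_to_natCast, PySem.List.slice_from_natCast]
          · rw [if_neg hC]
            have hE1 : pvEsc cs (j + 1) = false := by simp [pvEsc, hget, hB]
            have hI1 : pvIns cs (j + 1) = pvIns cs j := by simp [pvIns, hget, hQ]
            have hacc : pvAccept cs j = false := by
              simp only [pvAccept, hEf, Bool.not_false, Bool.true_and]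
              simpa using hC
            rw [pvFirst_skip cs j hacc, ← hI1, hEf, ← hE1]
            exact IH
  · have hdrop : cs.drop j = [] := List.drop_eq_nil_of_le (by omega)
    rw [hdrop, PySem.List.enumerate_nil, pvFirst, dif_neg h]
    rfl
termination_by cs.length - j
decreasing_by omega

lemma pvRunStart_le (cs : List Char) (j : Nat) : pvRunStart cs j ≤ j := by
  induction j with
  | zero => simp [pvRunStart]
  | succ k ih => unfold pvRunStart; split <;> omega

lemma pvUnescaped_eq (cs : List Char) (k : Nat) : pvUnescaped cs k = !pvEsc cs k := by
  induction k with
  | zero => simp [pvUnescaped, pvRunStart, pvEsc]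
  | succ k ih =>
    unfold pvUnescaped pvRunStart pvEsc
    by_cases h : cs[k]? = some '\\'
    · have hle := pvRunStart_le cs k
      have : pvUnescaped cs k = ((k - pvRunStart cs k) % 2 == 0) := rfl
      rw [this] at ih
      simp only [h, beq_self_eq_true, if_true]
      have harith : (k + 1 - pvRunStart cs k) % 2 = (k - pvRunStart cs k + 1) % 2 := by omega
      rcases Nat.even_or_odd (k - pvRunStart cs k) with he | ho
      · have h2 : (k - pvRunStart cs k) % 2 = 0 := Nat.even_iff.mp he
        have h3 : (k + 1 - pvRunStart cs k) % 2 = 1 := by omega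
        simp [h2, h3] at ih ⊢
        simp [← ih]
      · have h2 : (k - pvRunStart cs k) % 2 = 1 := Nat.odd_iff.mp ho
        have h3 : (k + 1 - pvRunStart cs k) % 2 = 0 := by omega
        simp [h2, h3] at ih ⊢
        simp [← ih]
    · have hb : (cs[k]? == some '\\') = false := by simpa using h
      simp [hb]

lemma pvCountQuotes_parity (cs : List Char) : ∀ d scanned quotes,
    ((quotes % 2 == 0) = !pvIns cs scanned) →
    ((pvCountQuotes cs scanned (scanned + d) quotes % 2 == 0) = !pvIns cs (scanned + d)) := by
  intro d
  induction d with
  | zero =>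
    intro scanned quotes hq
    simpa [pvCountQuotes, PySem.List.pyRange_zero] using hq
  | succ e ih =>
    intro scanned quotes hq
    have hcons : PySem.List.pyRange (scanned : Int) ((scanned + (e + 1) : Nat) : Int) 1 =
        (scanned : Int) :: PySem.List.pyRange ((scanned : Int) + 1) ((scanned + (e + 1) : Nat) : Int) 1 := by
      apply PySem.List.pyRange_one_cons
      push_cast
      omega
    have hq' : (((if (PySem.List.pyGet? cs (scanned : Int) == some '"') && pvUnescaped cs scanned
          then quotes + 1 else quotes) % 2 == 0) = !pvIns cs (scanned + 1)) := by
      rw [PySem.List.pyGet?_natCast, pvUnescaped_eq,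
        show ((cs[scanned]? == some '"') && !pvEsc cs scanned)
          = (!pvEsc cs scanned && (cs[scanned]? == some '"')) from Bool.and_comm .., pvIns]
      by_cases hc : (!pvEsc cs scanned && cs[scanned]? == some '"') = true
      · rw [if_pos hc, if_pos hc, Bool.not_not]
        rcases Nat.even_or_odd quotes with he | ho
        · have h2 : quotes % 2 = 0 := Nat.even_iff.mp he
          have h3 : (quotes + 1) % 2 = 1 := by omega
          simp [h2, h3] at hq ⊢
          simp [← hq]
        · have h2 : quotes % 2 = 1 := Nat.odd_iff.mp ho
          have h3 : (quotes + 1) % 2 = 0 := by omega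
          simp [h2, h3] at hq ⊢
          simp [← hq]
      · rw [if_neg hc, if_neg hc]
        exact hq
    have := ih (scanned + 1) (if (PySem.List.pyGet? cs (scanned : Int) == some '"') && pvUnescaped cs scanned
          then quotes + 1 else quotes) hq'
    unfold pvCountQuotes at this ⊢
    rw [hcons, List.foldl_cons]
    have harr : scanned + 1 + e = scanned + (e + 1) := by omega
    rw [harr] at this
    have hcast : ((scanned + 1 : Nat) : Int) = (scanned : Int) + 1 := by push_cast; ring
    rw [hcast] at this
    simp only [Int.toNat_natCast]
    exact this

lemma pvFirst_gap (cs : List Char) : ∀ d a, (∀ k, a ≤ k → k < a + d → pvTwo cs k = false) →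
    pvFirst cs a = pvFirst cs (a + d) := by
  intro d
  induction d with
  | zero => intro a _; rfl
  | succ e ih =>
    intro a h
    rw [pvFirst_skip cs a (by simp [pvAccept, h a le_rfl (by omega)]),
        ih (a + 1) (fun k hk1 hk2 => h k (by omega) (by omega))]
    ring_nf

lemma pvFirst_none (cs : List Char) (a : Nat) (h : ∀ k, a ≤ k → pvTwo cs k = false) :
    pvFirst cs a = none := by
  by_cases ha : a < cs.length
  · rw [pvFirst_skip cs a (by simp [pvAccept, h a le_rfl]), pvFirst_none cs (a + 1) (fun k hk => h k (by omega))]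
  · rw [pvFirst, dif_neg ha]
termination_by cs.length - a
decreasing_by omega

lemma pvBLoop_eq (cs : List Char) : ∀ fuel pos scanned quotes,
    cs.length + 1 ≤ fuel + pos → pos ≤ cs.length → scanned ≤ pos →
    ((quotes % 2 == 0) = !pvIns cs scanned) →
    pvBLoop cs fuel pos scanned quotes = pvOut cs (pvFirst cs pos) := by
  intro fuel
  induction fuel with
  | zero =>
    intro pos scanned quotes hf hp _ _
    exact absurd hf (by omega)
  | succ f ih =>
    intro pos scanned quotes hf hp hs hq
    rw [pvBLoop.eq_2]
    by_cases hneg : PySem.Chars.findFrom cs ['/', '/'] (pos : Int) none = -1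
    · rw [if_pos (by simpa using hneg)]
      have hnin : ¬ ['/', '/'] <:+: cs.drop pos :=
        (PySem.Chars.findFrom_natCast_eq_neg_one_iff cs ['/', '/'] pos hp).mp hneg
      rw [pvFirst_none cs pos ?_]
      · rfl
      · intro k hk
        by_cases h2 : pvTwo cs k = true
        · exfalso
          obtain ⟨t, ht⟩ := (pvTwo_iff cs k).mp h2
          have hdd : cs.drop k = List.drop (k - pos) (cs.drop pos) := by
            rw [List.drop_drop]
            congr 1
            omega
          obtain ⟨u, hu⟩ : List.drop (k - pos) (cs.drop pos) <:+ cs.drop pos := List.drop_suffix _ _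
          exact hnin ⟨u, t, by rw [← hu, ← hdd, ← ht, List.append_assoc]⟩
        · simpa using h2
    · rw [if_neg (by simpa using hneg)]
      obtain ⟨hle, hpre, hmin⟩ := PySem.Chars.findFrom_natCast_spec cs ['/', '/'] pos hp hneg
      set F := PySem.Chars.findFrom cs ['/', '/'] (pos : Int) none with hF
      have hF0 : 0 ≤ F := le_trans (by positivity) hle
      set iN := F.toNat with hiN
      have hposle : pos ≤ iN := by omega
      have hlen2 : 2 ≤ (cs.drop iN).length := hpre.length_le
      have hiNlt : iN + 1 < cs.length := by
        simp only [List.length_drop] at hlen2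
        omega
      have htwo : pvTwo cs iN = true := (pvTwo_iff cs iN).mpr hpre
      have hq' : ((pvCountQuotes cs scanned iN quotes % 2 == 0) = !pvIns cs iN) := by
        have := pvCountQuotes_parity cs (iN - scanned) scanned quotes hq
        rwa [show scanned + (iN - scanned) = iN by omega] at this
      have hgap : pvFirst cs pos = pvFirst cs iN := by
        have := pvFirst_gap cs (iN - pos) pos ?_
        · rwa [show pos + (iN - pos) = iN by omega] at this
        · intro k hk1 hk2
          by_cases h2 : pvTwo cs k = true
          · exact absurd ((pvTwo_iff cs k).mp h2) (hmin k hk1 (by omega))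
          · simpa using h2
      by_cases hcond : ((pvCountQuotes cs scanned iN quotes % 2 == 0) && pvUnescaped cs iN) = true
      · rw [if_pos hcond]
        have hacc : pvAccept cs iN = true := by
          rw [hq', pvUnescaped_eq] at hcond
          simp only [Bool.and_eq_true] at hcond
          simp [pvAccept, hcond.1, hcond.2, htwo]
        rw [hgap, pvFirst, dif_pos (by omega), if_pos hacc]
        simp [pvOut, PySem.List.slice_to_natCast, PySem.List.slice_from_natCast]
      · rw [if_neg hcond]
        have hacc : pvAccept cs iN = false := by
          rw [hq', pvUnescaped_eq] at hcond
          cases hI : pvIns cs iN <;> cases hEc : pvEsc cs iN <;> simp_all [pvAccept]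
        rw [hgap, pvFirst_skip cs iN hacc]
        exact ih (iN + 1) iN (pvCountQuotes cs scanned iN quotes) (by omega) (by omega) (by omega) hq'

-- ===== VERDICT (by name: the statement is the Claim_ definition above) =====
theorem split_trailing_comment_spec : Claim_equal_split_trailing_comment := by
  intro line _
  unfold Spec_split_trailing_comment split_trailing_comment split_trailing_comment_alt
  have hA := pvALoop_eq line.toList 0 (by omega)
  have hB := pvBLoop_eq line.toList (line.toList.length + 1) 0 0 0 (by omega) (by omega) (by omega) (by simp [pvIns])
  simpa [pvIns, pvEsc] using hA.trans hB.symm
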